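-- pv_equiv track=rewrite | github.com/freper/advent_of_code | 2021/day12/aoc12.py | has_visited_small_cave_twice
-- ===== SOURCE A (Python) =====
-- def has_visited_small_cave_twice(path):
--     caves = set()
--     for cave in path:
--         if cave.islower():
--             if cave in caves:
--                 return True
--             caves.add(cave)
--     return False
-- ===== SOURCE B (Python) =====
-- def has_visited_small_cave_twice(path):
--     smalls = [cave for cave in path if cave.islower()]
--     return len(smalls) != len(set(smalls))
-- ===== Notes on version B (the rewrite author's own statement) =====
-- stated objective: simpler
-- what changed: Replaces the incremental membership scan with early return by a single build-then-compare pass: collect the lowercase caves and compare total count to distinct count.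
import Mathlib
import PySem

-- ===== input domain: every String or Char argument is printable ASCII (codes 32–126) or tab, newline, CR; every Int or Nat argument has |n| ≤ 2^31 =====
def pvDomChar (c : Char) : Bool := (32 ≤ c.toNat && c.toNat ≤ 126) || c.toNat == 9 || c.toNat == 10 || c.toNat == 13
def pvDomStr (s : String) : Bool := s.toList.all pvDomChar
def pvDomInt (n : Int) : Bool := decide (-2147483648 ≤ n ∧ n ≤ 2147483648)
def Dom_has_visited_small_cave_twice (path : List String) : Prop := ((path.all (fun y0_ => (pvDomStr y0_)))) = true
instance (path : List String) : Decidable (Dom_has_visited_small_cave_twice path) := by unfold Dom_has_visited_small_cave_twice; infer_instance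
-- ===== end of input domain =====

-- B replaces A's incremental membership scan with a build-then-compare pass
-- (collect lowercase caves, compare total count to distinct count); objective: simpler.

-- ===== PORT A =====
-- Python str.islower(): at least one cased char and no uppercase cased char.
-- On the printable-ASCII domain the cased chars are exactly the letters, so this
-- equals: some lowercase letter present and no uppercase letter present (exact on Dom).
def pyStrIslower (s : String) : Bool :=
  s.toList.any (fun c => PySem.Chars.islower c) &&
    s.toList.all (fun c => !(PySem.Chars.isupper c))

def hvsctLoop (rest : List String) (caves : PySem.Set String) : Bool :=
  match rest with
  | [] => false
  | cave :: rest' =>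
    if pyStrIslower cave then
      if PySem.Set.contains caves cave then true
      else hvsctLoop rest' (PySem.Set.add caves cave)
    else hvsctLoop rest' caves

def has_visited_small_cave_twice (path : List String) : Bool :=
  hvsctLoop path PySem.Set.empty

-- ===== PORT B =====
def has_visited_small_cave_twice_alt (path : List String) : Bool :=
  let smalls := path.filter pyStrIslower
  decide (smalls.length ≠ (PySem.Set.ofList smalls).length)

-- ===== PRECONDITION & SPEC =====
def Spec_has_visited_small_cave_twice (path : List String) (out : Bool) : Prop := out = has_visited_small_cave_twice_alt path
instance (path : List String) (out : Bool) : Decidable (Spec_has_visited_small_cave_twice path out) := by unfold Spec_has_visited_small_cave_twice; infer_instance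

-- ===== CLAIM (what is proved, stated in full; the proofs are below) =====
def Claim_equal_has_visited_small_cave_twice : Prop := ∀ (path : List String), Dom_has_visited_small_cave_twice path → Spec_has_visited_small_cave_twice path (has_visited_small_cave_twice path)

-- ===== LEMMAS AND PROOFS =====

theorem set_add_of_mem (s : PySem.Set String) (x : String) (h : x ∈ s) :
    PySem.Set.add s x = s := by
  simp [PySem.Set.add, PySem.Set.contains, h]

theorem length_set_add_of_not_mem (s : PySem.Set String) (x : String) (h : x ∉ s) :
    (PySem.Set.add s x).length = s.length + 1 := by
  simp [PySem.Set.add, PySem.Set.contains, h]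

theorem length_set_add_le (s : PySem.Set String) (x : String) :
    (PySem.Set.add s x).length ≤ s.length + 1 := by
  by_cases h : x ∈ s
  · simp [set_add_of_mem s x h]
  · simp [length_set_add_of_not_mem s x h]

theorem length_set_update_le (xs : List String) (s : PySem.Set String) :
    (PySem.Set.update s xs).length ≤ s.length + xs.length := by
  induction xs generalizing s with
  | nil => simp [PySem.Set.update]
  | cons x xs ih =>
    have h1 : PySem.Set.update s (x :: xs) = PySem.Set.update (PySem.Set.add s x) xs := rfl
    have h2 := ih (PySem.Set.add s x)
    have h3 := length_set_add_le s x
    simp only [h1, List.length_cons]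
    omega

theorem hvsctLoop_eq (rest : List String) (s : PySem.Set String) :
    hvsctLoop rest s =
      !decide ((PySem.Set.update s (rest.filter pyStrIslower)).length
                = s.length + (rest.filter pyStrIslower).length) := by
  induction rest generalizing s with
  | nil => simp [hvsctLoop, PySem.Set.update]
  | cons c rest ih =>
    by_cases hl : pyStrIslower c
    · have hstep : (c :: rest).filter pyStrIslower = c :: rest.filter pyStrIslower := by
        simp [hl]
      have hupd : PySem.Set.update s (c :: rest.filter pyStrIslower)
          = PySem.Set.update (PySem.Set.add s c) (rest.filter pyStrIslower) := rfl
      by_cases hm : c ∈ s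
      · have hA : hvsctLoop (c :: rest) s = true := by
          simp [hvsctLoop, hl, PySem.Set.contains, hm]
        have hlen : (PySem.Set.update s ((c :: rest).filter pyStrIslower)).length
            ≠ s.length + ((c :: rest).filter pyStrIslower).length := by
          rw [hstep, hupd, set_add_of_mem s c hm]
          have := length_set_update_le (rest.filter pyStrIslower) s
          simp only [List.length_cons]
          omega
        simp [hA, hlen]
      · have hA : hvsctLoop (c :: rest) s = hvsctLoop rest (PySem.Set.add s c) := by
          simp [hvsctLoop, hl, PySem.Set.contains, hm]
        rw [hA, ih, hstep, hupd, length_set_add_of_not_mem s c hm]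
        simp only [List.length_cons]
        have harith : s.length + 1 + (rest.filter pyStrIslower).length
            = s.length + ((rest.filter pyStrIslower).length + 1) := by omega
        rw [harith]
        rfl

    · have hstep : (c :: rest).filter pyStrIslower = rest.filter pyStrIslower := by
        simp [hl]
      have hA : hvsctLoop (c :: rest) s = hvsctLoop rest s := by
        simp [hvsctLoop, hl]
      rw [hA, ih, hstep]

-- ===== VERDICT (by name: the statement is the Claim_ definition above) =====
theorem has_visited_small_cave_twice_spec : Claim_equal_has_visited_small_cave_twice := by
  unfold Claim_equal_has_visited_small_cave_twice
  intro path _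
  unfold Spec_has_visited_small_cave_twice
  unfold has_visited_small_cave_twice has_visited_small_cave_twice_alt
  rw [hvsctLoop_eq]
  have h0 : PySem.Set.update PySem.Set.empty (path.filter pyStrIslower)
      = PySem.Set.ofList (path.filter pyStrIslower) := rfl
  rw [h0]
  simp only [PySem.Set.empty, List.length_nil, Nat.zero_add]
  by_cases h : (path.filter pyStrIslower).length
      = (PySem.Set.ofList (path.filter pyStrIslower)).length
  · simp [h]
  · simp [h, Ne.symm h]
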